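-- pv_equiv track=rewrite | github.com/infomuscle/algorithms-hackerrank | amazon_2.py | findMaximumSustainableClusterSize
-- ===== SOURCE A (Python) =====
-- def findMaximumSustainableClusterSize(processingPower, bootingPower, powerMax):
--     n = len(processingPower)
--
--     front, rear = 0, 0
--
--     max_k = 0
--     max_boot = bootingPower[0]
--     sum_process = processingPower[0]
--     while rear < n:
--         k = rear - front + 1
--         if net_power_consumption_new(sum_process, max_boot, k) <= powerMax:
--             max_k = max(k, max_k)
--             rear += 1
--             if rear < n:
--                 max_boot = max(max_boot, bootingPower[rear])
--                 sum_process += processingPower[rear]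
--         else:
--             if rear > front:
--                 front += 1
--                 max_boot = max(bootingPower[front:rear + 1])
--                 sum_process -= processingPower[front - 1]
--             else:
--                 rear += 1
--                 if rear < n:
--                     max_boot = max(max_boot, bootingPower[rear])
--                     sum_process += processingPower[rear]
--     return max_k
--
-- def net_power_consumption_new(sum_process, max_boot, k):
--     return max_boot + sum_process * k
-- ===== SOURCE B (Python) =====
-- def findMaximumSustainableClusterSize(processingPower, bootingPower, powerMax):
--     n = len(processingPower)
--     ans = 0
--     front = 0
--     window_sum = 0
--     dq = []      # indices with strictly decreasing bootingPower values
--     head = 0     # logical front of the deque (dq[head:] is the live deque)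
--     for rear in range(n):
--         window_sum += processingPower[rear]
--         while len(dq) > head and bootingPower[dq[-1]] <= bootingPower[rear]:
--             dq.pop()
--         dq.append(rear)
--         while front < rear and bootingPower[dq[head]] + window_sum * (rear - front + 1) > powerMax:
--             window_sum -= processingPower[front]
--             front += 1
--             if dq[head] < front:
--                 head += 1
--         if bootingPower[dq[head]] + window_sum * (rear - front + 1) <= powerMax:
--             ans = max(ans, rear - front + 1)
--     return ans
-- ===== Notes on version B (the rewrite author's own statement) =====
-- stated objective: faster
-- what changed: Replaces A's recomputation of the window maximum by an O(n)-total slicing-free pass: a monotonic deque maintains the sliding-window maximum and a running sum replaces the slice sum, so each element is pushed/popped at most once.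
import Mathlib
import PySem

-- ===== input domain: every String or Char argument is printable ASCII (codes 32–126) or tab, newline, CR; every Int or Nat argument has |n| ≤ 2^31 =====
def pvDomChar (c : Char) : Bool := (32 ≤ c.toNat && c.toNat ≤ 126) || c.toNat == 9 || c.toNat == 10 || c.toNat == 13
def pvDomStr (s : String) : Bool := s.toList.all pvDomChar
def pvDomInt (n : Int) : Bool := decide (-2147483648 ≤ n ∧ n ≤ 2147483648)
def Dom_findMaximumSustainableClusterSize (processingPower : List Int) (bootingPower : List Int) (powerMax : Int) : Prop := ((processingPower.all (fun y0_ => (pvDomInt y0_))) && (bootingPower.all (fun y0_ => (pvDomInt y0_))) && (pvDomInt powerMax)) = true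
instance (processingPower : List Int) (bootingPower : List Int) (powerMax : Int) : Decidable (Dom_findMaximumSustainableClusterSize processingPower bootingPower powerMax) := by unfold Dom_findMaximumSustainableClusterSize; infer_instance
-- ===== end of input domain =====

-- B replaces A's repeated slice-max/slice-copy window maintenance (O(n^2)) by a single pass with a
-- monotonic deque for the sliding-window maximum and a running sum (O(n)); objective: faster.

-- ===== PORT A =====
def netPowerConsumptionNew (sumProcess : Int) (maxBoot : Int) (k : Int) : Int :=
  maxBoot + sumProcess * k

-- the while loop of A; fuel only makes the recursion structural (front+rear grows by 1 each step,
-- so 2*n+1 steps always suffice)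
def pvALoop (p : List Int) (b : List Int) (pm : Int) (n : Nat) :
    Nat → Nat → Nat → Int → Int → Int → Int
  | 0, _, _, maxK, _, _ => maxK
  | fuel+1, front, rear, maxK, maxBoot, sumProcess =>
    if rear < n then
      let k : Int := (rear : Int) - (front : Int) + 1
      if netPowerConsumptionNew sumProcess maxBoot k ≤ pm then
        if rear + 1 < n then
          pvALoop p b pm n fuel front (rear+1) (max k maxK)
            (max maxBoot (b.getD (rear+1) 0)) (sumProcess + p.getD (rear+1) 0)
        else
          pvALoop p b pm n fuel front (rear+1) (max k maxK) maxBoot sumProcess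
      else if front < rear then
        -- front += 1; max_boot = max(bootingPower[front:rear+1]); sum_process -= processingPower[front-1]
        pvALoop p b pm n fuel (front+1) rear maxK
          ((PySem.List.max? (PySem.List.slice b (some ((front+1 : Nat) : Int)) (some ((rear+1 : Nat) : Int))) (fun y => y)).getD 0)
          (sumProcess - p.getD front 0)
      else
        if rear + 1 < n then
          pvALoop p b pm n fuel front (rear+1) maxK
            (max maxBoot (b.getD (rear+1) 0)) (sumProcess + p.getD (rear+1) 0)
        else
          pvALoop p b pm n fuel front (rear+1) maxK maxBoot sumProcess
    else maxK

def findMaximumSustainableClusterSize (processingPower : List Int) (bootingPower : List Int) (powerMax : Int) : Int :=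
  let n := processingPower.length
  pvALoop processingPower bootingPower powerMax n (2*n+1) 0 0 0
    (bootingPower.getD 0 0) (processingPower.getD 0 0)

-- ===== PORT B =====
-- while len(dq) > head and bootingPower[dq[-1]] <= bootingPower[rear]: dq.pop()
-- (fuel = dq.length makes the recursion structural; each step drops the last element)
def pvPopLoop (b : List Int) (r : Nat) (head : Nat) : Nat → List Nat → List Nat
  | 0, dq => dq
  | fuel+1, dq =>
    if head < dq.length ∧ b.getD (dq.getLastD 0) 0 ≤ b.getD r 0 then
      pvPopLoop b r head fuel dq.dropLast
    else dq

-- while front < rear and bootingPower[dq[head]] + window_sum * (rear-front+1) > powerMax: …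
-- (fuel = rear - front; each step increments front); returns (front, head, window_sum)
def pvShrinkLoop (p : List Int) (b : List Int) (pm : Int) (r : Nat) (dq : List Nat) :
    Nat → Nat → Nat → Int → Nat × Nat × Int
  | 0, front, head, windowSum => (front, head, windowSum)
  | fuel+1, front, head, windowSum =>
    if front < r ∧ pm < b.getD (dq.getD head 0) 0 + windowSum * ((r : Int) - (front : Int) + 1) then
      pvShrinkLoop p b pm r dq fuel (front+1)
        (if dq.getD head 0 < front+1 then head+1 else head)
        (windowSum - p.getD front 0)
    else (front, head, windowSum)

-- one iteration of the 'for rear in range(n)' loop; state = (ans, front, window_sum, dq, head)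
def pvBStep (p : List Int) (b : List Int) (pm : Int)
    (st : Int × Nat × Int × List Nat × Nat) (r : Nat) : Int × Nat × Int × List Nat × Nat :=
  match st with
  | (ans, front, windowSum, dq, head) =>
    let ws0 := windowSum + p.getD r 0
    let dq' := pvPopLoop b r head dq.length dq ++ [r]
    let s := pvShrinkLoop p b pm r dq' (r - front) front head ws0
    let k : Int := (r : Int) - (s.1 : Int) + 1
    let ans' := if b.getD (dq'.getD s.2.1 0) 0 + s.2.2 * k ≤ pm then max ans k else ans
    (ans', s.1, s.2.2, dq', s.2.1)

def findMaximumSustainableClusterSize_alt (processingPower : List Int) (bootingPower : List Int) (powerMax : Int) : Int :=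
  ((List.range processingPower.length).foldl (pvBStep processingPower bootingPower powerMax)
    (0, 0, 0, ([] : List Nat), 0)).1

-- ===== PRECONDITION & SPEC =====
-- A indexes processingPower[0], bootingPower[0] and bootingPower[rear] for every rear < len(processingPower):
-- it raises IndexError iff processingPower is empty or bootingPower is shorter than processingPower.
def Pre_findMaximumSustainableClusterSize (processingPower : List Int) (bootingPower : List Int) (powerMax : Int) : Prop :=
  processingPower ≠ [] ∧ processingPower.length ≤ bootingPower.length
instance (processingPower : List Int) (bootingPower : List Int) (powerMax : Int) : Decidable (Pre_findMaximumSustainableClusterSize processingPower bootingPower powerMax) := by unfold Pre_findMaximumSustainableClusterSize; infer_instance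

def pvWitness_findMaximumSustainableClusterSize : List Int × List Int × Int := ([2, 1, 3], [3, 1, 2], 20)

def Spec_findMaximumSustainableClusterSize (processingPower : List Int) (bootingPower : List Int) (powerMax : Int) (out : Int) : Prop := out = findMaximumSustainableClusterSize_alt processingPower bootingPower powerMax
instance (processingPower : List Int) (bootingPower : List Int) (powerMax : Int) (out : Int) : Decidable (Spec_findMaximumSustainableClusterSize processingPower bootingPower powerMax out) := by unfold Spec_findMaximumSustainableClusterSize; infer_instance

-- ===== CLAIM (what is proved, stated in full; the proofs are below) =====
def Claim_equal_findMaximumSustainableClusterSize : Prop := ∀ (processingPower : List Int) (bootingPower : List Int) (powerMax : Int), Dom_findMaximumSustainableClusterSize processingPower bootingPower powerMax → Pre_findMaximumSustainableClusterSize processingPower bootingPower powerMax → Spec_findMaximumSustainableClusterSize processingPower bootingPower powerMax (findMaximumSustainableClusterSize processingPower bootingPower powerMax)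

-- ===== LEMMAS AND PROOFS =====

-- window b f r = the list b[f..r]; its running maximum and its sum
def pvWin (l : List Int) (f r : Nat) : List Int := (l.drop f).take (r + 1 - f)

def pvLmax : List Int → Int
  | [] => 0
  | x :: t => t.foldl max x

def pvWmax (b : List Int) (f r : Nat) : Int := pvLmax (pvWin b f r)
def pvWsum (p : List Int) (f r : Nat) : Int := (pvWin p f r).sum

-- common abstract cost of the window [f, r]
def pvCost (p b : List Int) (f r : Nat) : Int :=
  pvWmax b f r + pvWsum p f r * ((r : Int) - (f : Int) + 1)

-- the rear-major shrink loop both programs implement (fuel = r - front)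
def pvCShrink (p b : List Int) (pm : Int) (r : Nat) : Nat → Nat → Nat
  | 0, front => front
  | fuel+1, front =>
    if front < r ∧ pm < pvCost p b front r then
      pvCShrink p b pm r fuel (front+1)
    else front

-- the remaining rear-major iterations (gas = n - rear)
def pvCRest (p b : List Int) (pm : Int) : Nat → Nat → Nat → Int → Int
  | 0, _, _, ans => ans
  | gas+1, front, rear, ans =>
    let f := pvCShrink p b pm rear (rear - front) front
    let k : Int := (rear : Int) - (f : Int) + 1
    pvCRest p b pm gas f (rear+1) (if pvCost p b f rear ≤ pm then max k ans else ans)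

-- C's state (front, ans) after processing rears 0 .. r-1
def pvCState (p b : List Int) (pm : Int) : Nat → Nat × Int
  | 0 => (0, 0)
  | r+1 =>
    let st := pvCState p b pm r
    let f := pvCShrink p b pm r (r - st.1) st.1
    let k : Int := (r : Int) - (f : Int) + 1
    (f, if pvCost p b f r ≤ pm then max k st.2 else st.2)

-- deque characterisation: i is live iff every later index in the window has a strictly smaller boot value
def pvIsCand (b : List Int) (r i : Nat) : Bool :=
  (List.range' (i+1) (r - i)).all (fun j => decide (b.getD j 0 < b.getD i 0))
def pvCands (b : List Int) (f r : Nat) : List Nat :=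
  (List.range' f (r + 1 - f)).filter (pvIsCand b r)

theorem pvWin_cons {l : List Int} {f r : Nat} (hfr : f ≤ r) (hf : f < l.length) :
    pvWin l f r = l.getD f 0 :: pvWin l (f+1) r := by
  unfold pvWin
  rw [List.drop_eq_getElem_cons hf, show r + 1 - f = (r - f) + 1 by omega, List.take_succ_cons,
    show r + 1 - (f+1) = r - f by omega, List.getD_eq_getElem l 0 hf]

theorem pvWin_snoc {l : List Int} {f r : Nat} (hfr : f ≤ r + 1) (hr : r + 1 < l.length) :
    pvWin l f (r+1) = pvWin l f r ++ [l.getD (r+1) 0] := by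
  unfold pvWin
  rw [show r + 1 + 1 - f = (r + 1 - f) + 1 by omega, List.take_add_one]
  congr 1
  have h1 : (l.drop f)[r+1-f]? = l[f + (r+1-f)]? := List.getElem?_drop ..
  rw [h1, show f + (r+1-f) = r + 1 by omega, List.getElem?_eq_getElem hr,
    List.getD_eq_getElem l 0 hr]
  rfl

theorem pvWin_self {l : List Int} {r : Nat} (hr : r < l.length) :
    pvWin l r r = [l.getD r 0] := by
  unfold pvWin
  rw [show r + 1 - r = 1 by omega, List.drop_eq_getElem_cons hr, List.take_succ_cons,
    List.take_zero, List.getD_eq_getElem l 0 hr]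

theorem pvLmax_snoc {l : List Int} (h : l ≠ []) (y : Int) :
    pvLmax (l ++ [y]) = max (pvLmax l) y := by
  match l with
  | x :: t => simp [pvLmax, List.foldl_append]

theorem pvLmax_cons {l : List Int} (h : l ≠ []) (x : Int) :
    pvLmax (x :: l) = max x (pvLmax l) := by
  match l with
  | y :: t => simp only [pvLmax, List.foldl_cons]; exact List.foldl_assoc

theorem pvWin_ne_nil {l : List Int} {f r : Nat} (hfr : f ≤ r) (hf : f < l.length) :
    pvWin l f r ≠ [] := by
  have : (pvWin l f r).length ≠ 0 := by
    unfold pvWin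
    rw [List.length_take, List.length_drop]
    omega
  intro h; rw [h] at this; exact this rfl

-- maintenance facts used by both sides
theorem pvWmax_snoc {b : List Int} {f r : Nat} (hfr : f ≤ r) (hf : f < b.length) (hr : r + 1 < b.length) :
    pvWmax b f (r+1) = max (pvWmax b f r) (b.getD (r+1) 0) := by
  unfold pvWmax
  rw [pvWin_snoc (by omega) hr, pvLmax_snoc (pvWin_ne_nil hfr hf)]

theorem pvWsum_snoc {p : List Int} {f r : Nat} (hfr : f ≤ r) (hf : f < p.length) (hr : r + 1 < p.length) :
    pvWsum p f (r+1) = pvWsum p f r + p.getD (r+1) 0 := by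
  unfold pvWsum
  rw [pvWin_snoc (by omega) hr, List.sum_append, List.sum_cons, List.sum_nil, add_zero]

theorem pvWmax_cons {b : List Int} {f r : Nat} (hfr : f < r) (hr : r < b.length) :
    pvWmax b f r = max (b.getD f 0) (pvWmax b (f+1) r) := by
  unfold pvWmax
  rw [pvWin_cons (le_of_lt hfr) (by omega), pvLmax_cons (pvWin_ne_nil hfr (by omega))]

theorem pvWsum_cons {p : List Int} {f r : Nat} (hfr : f < r) (hr : r < p.length) :
    pvWsum p (f+1) r = pvWsum p f r - p.getD f 0 := by
  unfold pvWsum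
  rw [pvWin_cons (le_of_lt hfr) (by omega), List.sum_cons]
  ring


theorem pvWin_mem {l : List Int} {f r i : Nat} (hfi : f ≤ i) (hir : i ≤ r) (hi : i < l.length) :
    l.getD i 0 ∈ pvWin l f r := by
  apply List.mem_of_getElem? (i := i - f)
  unfold pvWin
  rw [List.getElem?_take_of_lt (by omega), List.getElem?_drop,
    show f + (i - f) = i by omega, List.getElem?_eq_getElem hi, List.getD_eq_getElem l 0 hi]

theorem pvWin_elem {l : List Int} {f r : Nat} {y : Int} (h : y ∈ pvWin l f r) :
    ∃ i, f ≤ i ∧ i ≤ r ∧ i < l.length ∧ l.getD i 0 = y := by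
  obtain ⟨j, hj, hy⟩ := List.getElem_of_mem h
  have hlen : (pvWin l f r).length = min (r + 1 - f) (l.length - f) := by
    unfold pvWin; rw [List.length_take, List.length_drop]
  refine ⟨f + j, by omega, by omega, by omega, ?_⟩
  have h1 : (pvWin l f r)[j] = l[f + j]'(by omega) := by
    unfold pvWin at hj ⊢
    rw [List.getElem_take, List.getElem_drop]
  rw [List.getD_eq_getElem l 0 (by omega), ← hy, h1]

theorem pvLmax_ge {l : List Int} {y : Int} (h : y ∈ l) : y ≤ pvLmax l := by
  match l with
  | x :: t =>
    have := PySem.List.le_foldl_max t x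
    rcases List.mem_cons.mp h with rfl | hm
    · exact this.1
    · exact this.2 y hm

theorem pvLmax_mem {l : List Int} (h : l ≠ []) : pvLmax l ∈ l := by
  match l with
  | x :: t =>
    rcases PySem.List.foldl_max_mem t x with h1 | h1
    · rw [pvLmax, h1]; exact List.mem_cons_self
    · exact List.mem_cons_of_mem x h1

-- A's slice max is the window max
theorem pvSliceMax {b : List Int} {f r : Nat} (hfr : f ≤ r) (hr : r < b.length) :
    (PySem.List.max? (PySem.List.slice b (some ((f : Nat) : Int)) (some ((r+1 : Nat) : Int))) (fun y => y)).getD 0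
      = pvWmax b f r := by
  have hs : PySem.List.slice b (some ((f : Nat) : Int)) (some ((r+1 : Nat) : Int)) = pvWin b f r := by
    rw [PySem.List.slice_natCast]; rfl
  rw [hs]
  rcases hw : pvWin b f r with _ | ⟨x, t⟩
  · exact absurd hw (pvWin_ne_nil hfr (by omega))
  · rw [PySem.List.max?_id_cons, Option.getD_some]
    unfold pvWmax; rw [hw]; rfl

-- elements of the window are ≤ its max; the max is an element
theorem pvWmax_le {b : List Int} {f r i : Nat} (hfi : f ≤ i) (hir : i ≤ r) (hi : i < b.length) :
    b.getD i 0 ≤ pvWmax b f r := by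
  exact pvLmax_ge (pvWin_mem hfi hir hi)

theorem pvWmax_attained {b : List Int} {f r : Nat} (hfr : f ≤ r) (hr : r < b.length) :
    ∃ i, f ≤ i ∧ i ≤ r ∧ b.getD i 0 = pvWmax b f r := by
  obtain ⟨i, h1, h2, _, h4⟩ := pvWin_elem (pvLmax_mem (pvWin_ne_nil hfr (lt_of_le_of_lt hfr hr)))
  exact ⟨i, h1, h2, h4⟩

-- ---- deque (cands) facts ----
theorem pvCands_self {b : List Int} {r : Nat} : pvCands b r r = [r] := by
  unfold pvCands
  rw [show r + 1 - r = 1 by omega, List.range'_one, List.filter_cons]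
  have : pvIsCand b r r = true := by
    unfold pvIsCand; rw [show r - r = 0 by omega]; rfl
  simp [this]

theorem pvCands_cons {b : List Int} {f r : Nat} (hfr : f ≤ r) :
    pvCands b f r = (if pvIsCand b r f then [f] else []) ++ pvCands b (f+1) r := by
  unfold pvCands
  rw [show r + 1 - f = (r - f) + 1 by omega, List.range'_succ, List.filter_cons,
    show r + 1 - (f + 1) = r - f by omega]
  split <;> simp

theorem pvCands_snoc {b : List Int} {f r : Nat} (hfr : f ≤ r) :
    pvCands b f (r+1)
      = (pvCands b f r).filter (fun i => decide (b.getD (r+1) 0 < b.getD i 0)) ++ [r+1] := by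
  unfold pvCands
  rw [show r + 1 + 1 - f = (r + 1 - f) + 1 by omega, List.range'_1_concat,
    show f + (r + 1 - f) = r + 1 by omega, List.filter_append, List.filter_filter]
  congr 1
  · apply List.filter_congr
    intro i hi
    have hir : i ≤ r := by
      have := List.mem_range'_1.mp hi; omega
    show pvIsCand b (r+1) i = (decide (b.getD (r+1) 0 < b.getD i 0) && pvIsCand b r i)
    unfold pvIsCand
    rw [show r + 1 - i = (r - i) + 1 by omega, List.range'_1_concat,
      show i + 1 + (r - i) = r + 1 by omega, List.all_append]
    simp [Bool.and_comm]
  · have : pvIsCand b (r+1) (r+1) = true := by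
      unfold pvIsCand; rw [show r + 1 - (r+1) = 0 by omega]; rfl
    simp [this]

theorem pvCands_mem {b : List Int} {f r i : Nat} (h : i ∈ pvCands b f r) :
    f ≤ i ∧ i ≤ r ∧ pvIsCand b r i = true := by
  unfold pvCands at h
  have h2 := List.mem_filter.mp h
  have h3 := List.mem_range'_1.mp h2.1
  exact ⟨h3.1, by omega, h2.2⟩

theorem pvCands_pairwise {b : List Int} {f r : Nat} :
    (pvCands b f r).Pairwise (fun i j => b.getD j 0 < b.getD i 0) := by
  have hrange : ∀ s n : Nat, (List.range' s n).Pairwise (· < ·) := by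
    intro s n
    induction n generalizing s with
    | zero => simp
    | succ n ih =>
      rw [List.range'_succ]
      exact List.Pairwise.cons
        (by intro a ha; have := List.mem_range'_1.mp ha; omega) (ih (s+1))
  have hlt : (pvCands b f r).Pairwise (· < ·) := List.Pairwise.filter _ (hrange f (r+1-f))
  apply List.Pairwise.imp_of_mem ?_ hlt
  intro i j hi hj hij
  obtain ⟨hfi, hir, hci⟩ := pvCands_mem hi
  obtain ⟨hfj, hjr, _⟩ := pvCands_mem hj
  have := (List.all_eq_true.mp hci) j (by rw [List.mem_range'_1]; omega)
  exact of_decide_eq_true this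

theorem pvCands_ne_nil {b : List Int} {f r : Nat} (hfr : f ≤ r) : pvCands b f r ≠ [] := by
  have : r ∈ pvCands b f r := by
    unfold pvCands
    apply List.mem_filter.mpr
    refine ⟨List.mem_range'_1.mpr (by omega), ?_⟩
    unfold pvIsCand; rw [show r - r = 0 by omega]; rfl
  exact List.ne_nil_of_mem this

-- the first live index carries the window maximum
theorem pvCands_head {b : List Int} {f r : Nat} (hfr : f ≤ r) (hr : r < b.length) :
    b.getD ((pvCands b f r).headD 0) 0 = pvWmax b f r := by
  suffices h : ∀ k f, f ≤ r → r - f = k → b.getD ((pvCands b f r).headD 0) 0 = pvWmax b f r by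
    exact h (r - f) f hfr rfl
  intro k
  induction k with
  | zero =>
    intro f hfr hk
    have : f = r := by omega
    subst this
    rw [pvCands_self]
    show b.getD f 0 = pvWmax b f f
    unfold pvWmax
    rw [pvWin_self hr]; rfl
  | succ k ih =>
    intro f hfr hk
    have hfr' : f < r := by omega
    rw [pvCands_cons (le_of_lt hfr')]
    by_cases hc : pvIsCand b r f = true
    · rw [if_pos hc]
      show b.getD f 0 = pvWmax b f r
      rw [pvWmax_cons hfr' hr]
      obtain ⟨i, h1, h2, h3⟩ := pvWmax_attained (f := f+1) (r := r) (by omega) hr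
      have hlt : b.getD i 0 < b.getD f 0 := by
        have := (List.all_eq_true.mp hc) i (by rw [List.mem_range'_1]; omega)
        exact of_decide_eq_true this
      rw [max_eq_left (by omega)]
    · rw [if_neg hc, List.nil_append]
      rw [ih (f+1) (by omega) (by omega), pvWmax_cons hfr' hr]
      unfold pvIsCand at hc
      rw [List.all_eq_true] at hc
      push Not at hc
      obtain ⟨j, hj, hcj⟩ := hc
      have hjr := List.mem_range'_1.mp hj
      have h1 : b.getD f 0 ≤ b.getD j 0 := by
        by_contra hcon
        exact hcj (decide_eq_true (by omega))
      have h2 : b.getD j 0 ≤ pvWmax b (f+1) r := pvWmax_le (by omega) (by omega) (by omega)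
      rw [max_eq_right (by omega)]

-- popping the tail leaves exactly the candidates that survive appending r
theorem pvGetLastD_split {dq : List Nat} {head : Nat} (h : dq.drop head ≠ []) :
    dq.getLastD 0 = (dq.drop head).getLastD 0 := by
  conv_lhs => rw [← List.take_append_drop head dq]
  rw [List.getLastD_eq_getLast?, List.getLastD_eq_getLast?,
    List.getLast?_append_of_ne_nil _ h]

theorem pvDropLast_concat_getLastD {l : List Nat} (h : l ≠ []) :
    l.dropLast ++ [l.getLastD 0] = l := by
  conv_rhs => rw [← List.dropLast_append_getLast h]
  rw [List.getLastD_eq_getLast?, List.getLast?_eq_some_getLast h]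
  rfl

theorem pvPop_spec {b : List Int} {r : Nat} {head : Nat} :
    ∀ fuel dq, dq.length ≤ fuel → head ≤ dq.length →
      (dq.drop head).Pairwise (fun i j => b.getD j 0 < b.getD i 0) →
      pvPopLoop b r head fuel dq
        = dq.take head ++ (dq.drop head).filter (fun i => decide (b.getD r 0 < b.getD i 0)) := by
  intro fuel
  induction fuel with
  | zero =>
    intro dq hlen _ _
    have : dq = [] := List.length_eq_zero_iff.mp (by omega)
    subst this
    simp [pvPopLoop]
  | succ fuel ih =>
    intro dq hlen hhead hpw
    rw [pvPopLoop]
    by_cases hcond : head < dq.length ∧ b.getD (dq.getLastD 0) 0 ≤ b.getD r 0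
    · rw [if_pos hcond]
      obtain ⟨h1, h2⟩ := hcond
      have hLne : dq.drop head ≠ [] := by
        intro h; have := congrArg List.length h; simp at this; omega
      have hdropdrop : (dq.dropLast).drop head = (dq.drop head).dropLast := by
        rw [List.dropLast_eq_take, List.dropLast_eq_take, List.drop_take, List.length_drop]
        congr 1; omega
      rw [ih dq.dropLast (by rw [List.length_dropLast]; omega)
            (by rw [List.length_dropLast]; omega)
            (by rw [hdropdrop]; exact hpw.sublist (List.dropLast_sublist _))]
      rw [hdropdrop]
      have htake : dq.dropLast.take head = dq.take head := by
        rw [List.dropLast_eq_take, List.take_take]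
        congr 1; omega
      rw [htake]
      congr 1
      conv_rhs => rw [← pvDropLast_concat_getLastD hLne]
      rw [List.filter_append]
      have : (decide (b.getD r 0 < b.getD ((dq.drop head).getLastD 0) 0)) = false := by
        rw [← pvGetLastD_split hLne]
        simp only [decide_eq_false_iff_not]
        omega
      have hone : List.filter (fun i => decide (b.getD r 0 < b.getD i 0))
          [(dq.drop head).getLastD 0] = [] := by
        simp only [List.filter_cons, List.filter_nil, this, Bool.false_eq_true, if_false]
      rw [hone, List.append_nil]
    · rw [if_neg hcond]
      by_cases h1 : head < dq.length
      · have h2 : b.getD r 0 < b.getD (dq.getLastD 0) 0 := by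
          rcases not_and_or.mp hcond with h | h
          · exact absurd h1 h
          · omega
        have hLne : dq.drop head ≠ [] := by
          intro h; have := congrArg List.length h; simp at this; omega
        have hfil : (dq.drop head).filter (fun i => decide (b.getD r 0 < b.getD i 0))
            = dq.drop head := by
          apply List.filter_eq_self.mpr
          intro y hy
          simp only [decide_eq_true_eq]
          rw [pvGetLastD_split hLne] at h2
          conv at hy => rw [← pvDropLast_concat_getLastD hLne]
          rcases List.mem_append.mp hy with hy' | hy'
          · have hpw2 : (dq.drop head).Pairwise (fun i j => b.getD j 0 < b.getD i 0) := hpw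
            conv at hpw2 => rw [← pvDropLast_concat_getLastD hLne]
            have := (List.pairwise_append.mp hpw2).2.2 y hy'
              ((dq.drop head).getLastD 0) (List.mem_singleton_self _)
            omega
          · rw [List.mem_singleton.mp hy']; exact h2
        rw [hfil, List.take_append_drop]
      · have hge : dq.length ≤ head := by omega
        rw [List.drop_eq_nil_of_le hge, List.take_of_length_le hge]
        simp

-- advancing front: the deque head moves by at most one
theorem pvHead_advance {b : List Int} {f r head : Nat} {dq : List Nat} (hfr : f < r)
    (hdq : dq.drop head = pvCands b f r) :
    dq.drop (if dq.getD head 0 < f+1 then head+1 else head) = pvCands b (f+1) r := by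
  have hcons := pvCands_cons (b := b) (le_of_lt hfr)
  have hgetD : dq.getD head 0 = (dq.drop head).getD 0 0 := by
    rw [List.getD_eq_getElem?_getD, List.getD_eq_getElem?_getD, List.getElem?_drop, Nat.add_zero]
  by_cases hc : pvIsCand b r f = true
  · rw [if_pos hc] at hcons
    have hget : dq.getD head 0 = f := by
      rw [hgetD, hdq, hcons]; rfl
    rw [hget, if_pos (by omega)]
    have hdrop : dq.drop (head+1) = (dq.drop head).tail := by
      rw [← List.drop_one, List.drop_drop]
    rw [hdrop, hdq, hcons]
    rfl
  · rw [if_neg hc, List.nil_append] at hcons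
    rcases hx : pvCands b (f+1) r with _ | ⟨x, t⟩
    · exact absurd hx (pvCands_ne_nil (by omega))
    · have hget : dq.getD head 0 = x := by
        rw [hgetD, hdq, hcons, hx]; rfl
      have hxmem : x ∈ pvCands b (f+1) r := by rw [hx]; exact List.mem_cons_self
      have hxge : f + 1 ≤ x := (pvCands_mem hxmem).1
      rw [hget, if_neg (by omega), hdq, hcons, hx]

-- the shrink loop tracks pvCShrink and maintains the running sum and the deque head
theorem pvShrink_spec {p b : List Int} {pm : Int} {r : Nat} {dq : List Nat}
    (hrp : r < p.length) (hrb : r < b.length) :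
    ∀ fuel front head ws, fuel = r - front → front ≤ r →
      dq.drop head = pvCands b front r → ws = pvWsum p front r →
      ∃ h', pvShrinkLoop p b pm r dq fuel front head ws
          = (pvCShrink p b pm r fuel front, h', pvWsum p (pvCShrink p b pm r fuel front) r)
        ∧ dq.drop h' = pvCands b (pvCShrink p b pm r fuel front) r := by
  intro fuel
  induction fuel with
  | zero =>
    intro front head ws hfuel hfr hdq hws
    refine ⟨head, ?_, ?_⟩
    · rw [pvShrinkLoop, pvCShrink, hws]
    · rw [pvCShrink]; exact hdq
  | succ fuel ih =>
    intro front head ws hfuel hfr hdq hws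
    have hget : b.getD (dq.getD head 0) 0 = pvWmax b front r := by
      have hgetD : dq.getD head 0 = (dq.drop head).getD 0 0 := by
        rw [List.getD_eq_getElem?_getD, List.getD_eq_getElem?_getD, List.getElem?_drop,
          Nat.add_zero]
      have hhd : (pvCands b front r).getD 0 0 = (pvCands b front r).headD 0 := by
        rcases pvCands b front r with _ | ⟨x, t⟩ <;> rfl
      rw [hgetD, hdq, hhd, pvCands_head hfr hrb]
    by_cases hcond : front < r ∧ pm < pvCost p b front r
    · have hcondB : front < r ∧
          pm < b.getD (dq.getD head 0) 0 + ws * ((r : Int) - (front : Int) + 1) := by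
        rw [hget, hws]; exact hcond
      rw [pvShrinkLoop, if_pos hcondB, pvCShrink, if_pos hcond]
      exact ih (front+1) _ _ (by omega) (by omega)
        (pvHead_advance hcond.1 hdq)
        (by rw [hws]; exact (pvWsum_cons hcond.1 hrp).symm)
    · have hcondB : ¬ (front < r ∧
          pm < b.getD (dq.getD head 0) 0 + ws * ((r : Int) - (front : Int) + 1)) := by
        rw [hget, hws]; exact hcond
      rw [pvShrinkLoop, if_neg hcondB, pvCShrink, if_neg hcond]
      exact ⟨head, by rw [hws], hdq⟩

theorem pvCShrink_le {p b : List Int} {pm : Int} {r : Nat} :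
    ∀ fuel front, front ≤ r → pvCShrink p b pm r fuel front ≤ r := by
  intro fuel
  induction fuel with
  | zero => intro front h; exact h
  | succ fuel ih =>
    intro front h
    rw [pvCShrink]
    split
    · exact ih (front+1) (by omega)
    · exact h

theorem pvCShrink_stop {p b : List Int} {pm : Int} {r : Nat} {front : Nat}
    (h : pvCost p b front r ≤ pm) : ∀ fuel, pvCShrink p b pm r fuel front = front := by
  intro fuel
  cases fuel with
  | zero => rfl
  | succ fuel => rw [pvCShrink, if_neg (by omega)]

-- ---- A = C ----
theorem pvALoop_exit {p b : List Int} {pm : Int} {n : Nat} {front rear : Nat}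
    {maxK mb sp : Int} (h : ¬ rear < n) :
    ∀ fuel, pvALoop p b pm n fuel front rear maxK mb sp = maxK := by
  intro fuel
  cases fuel with
  | zero => rfl
  | succ fuel => rw [pvALoop, if_neg h]

theorem pvALoop_eq_cRest {p b : List Int} {pm : Int} {n : Nat}
    (hn : n = p.length) (hb : n ≤ b.length) :
    ∀ fuel front rear maxK, front ≤ rear → rear < n → 2*n - front - rear ≤ fuel →
      pvALoop p b pm n fuel front rear maxK (pvWmax b front rear) (pvWsum p front rear)
        = pvCRest p b pm (n - rear) front rear maxK := by
  intro fuel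
  induction fuel with
  | zero => intro front rear maxK hfr hrn hfuel; omega
  | succ fuel ih =>
    intro front rear maxK hfr hrn hfuel
    simp only [pvALoop]
    rw [if_pos hrn]
    have hcost : netPowerConsumptionNew (pvWsum p front rear) (pvWmax b front rear)
        ((rear : Int) - (front : Int) + 1) = pvCost p b front rear := rfl
    rw [hcost]
    have hrw : n - rear = (n - rear - 1) + 1 := by omega
    by_cases hok : pvCost p b front rear ≤ pm
    · rw [if_pos hok, hrw]
      simp only [pvCRest]
      rw [pvCShrink_stop hok, if_pos hok]
      by_cases hrn1 : rear + 1 < n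
      · rw [if_pos hrn1, ← pvWmax_snoc hfr (by omega) (by omega),
          ← pvWsum_snoc hfr (by omega) (by omega),
          ih front (rear+1) _ (by omega) hrn1 (by omega),
          show n - rear - 1 = n - (rear + 1) by omega]
      · rw [if_neg hrn1, pvALoop_exit (by omega),
          show n - rear - 1 = 0 by omega, pvCRest]
    · rw [if_neg hok]
      by_cases hfrlt : front < rear
      · rw [if_pos hfrlt,
          pvSliceMax (f := front + 1) (r := rear) (by omega) (by omega),
          show pvWsum p front rear - p.getD front 0 = pvWsum p (front+1) rear from
            (pvWsum_cons hfrlt (by omega)).symm,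
          ih (front+1) rear maxK (by omega) hrn (by omega),
          hrw]
        simp only [pvCRest]
        have hshr : pvCShrink p b pm rear (rear - (front+1)) (front+1)
            = pvCShrink p b pm rear (rear - front) front := by
          conv_rhs => rw [show rear - front = (rear - (front+1)) + 1 by omega]
          rw [pvCShrink, if_pos ⟨hfrlt, by omega⟩]
        rw [hshr]
      · rw [if_neg hfrlt, hrw]
        simp only [pvCRest]
        rw [show rear - front = 0 by omega]
        simp only [pvCShrink]
        rw [if_neg hok]
        by_cases hrn1 : rear + 1 < n
        · rw [if_pos hrn1, ← pvWmax_snoc hfr (by omega) (by omega),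
            ← pvWsum_snoc hfr (by omega) (by omega),
            ih front (rear+1) maxK (by omega) hrn1 (by omega),
            show n - rear - 1 = n - (rear + 1) by omega]
        · rw [if_neg hrn1, pvALoop_exit (by omega),
            show n - rear - 1 = 0 by omega, pvCRest]

-- ---- C bookkeeping ----
theorem pvCRest_eq_cState {p b : List Int} {pm : Int} :
    ∀ gas front rear ans, (front, ans) = pvCState p b pm rear →
      pvCRest p b pm gas front rear ans = (pvCState p b pm (rear + gas)).2 := by
  intro gas
  induction gas with
  | zero =>
    intro front rear ans h
    rw [Nat.add_zero, ← h]; rfl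
  | succ gas ih =>
    intro front rear ans h
    simp only [pvCRest]
    rw [ih _ (rear+1) _ (by simp only [pvCState, ← h]),
      show rear + (gas + 1) = rear + 1 + gas by omega]

theorem pvCState_front_le {p b : List Int} {pm : Int} :
    ∀ r, 1 ≤ r → (pvCState p b pm r).1 ≤ r - 1 := by
  intro r
  induction r with
  | zero => intro h; omega
  | succ r ih =>
    intro _
    simp only [pvCState]
    have hle : (pvCState p b pm r).1 ≤ r := by
      cases r with
      | zero => simp [pvCState]
      | succ m => have := ih (by omega); omega
    have := pvCShrink_le (p := p) (b := b) (pm := pm) (r := r)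
      (r - (pvCState p b pm r).1) (pvCState p b pm r).1 hle
    omega

-- ---- B = C ----
theorem pvBFold_eq_cState {p b : List Int} {pm : Int}
    (hb : p.length ≤ b.length) :
    ∀ r, r ≤ p.length →
      ∃ ws dq head,
        (List.range r).foldl (pvBStep p b pm) (0, 0, 0, ([] : List Nat), 0)
          = ((pvCState p b pm r).2, (pvCState p b pm r).1, ws, dq, head)
        ∧ (1 ≤ r → ws = pvWsum p (pvCState p b pm r).1 (r-1) ∧ head ≤ dq.length
            ∧ dq.drop head = pvCands b (pvCState p b pm r).1 (r-1))
        ∧ (r = 0 → ws = 0 ∧ dq = [] ∧ head = 0) := by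
  intro r
  induction r with
  | zero =>
    intro _
    exact ⟨0, [], 0, rfl, by omega, fun _ => ⟨rfl, rfl, rfl⟩⟩
  | succ r ih =>
    intro hr1
    obtain ⟨ws, dq, head, heq, h1, h0⟩ := ih (by omega)
    have hrp : r < p.length := by omega
    have hrb : r < b.length := by omega
    rw [List.range_succ, List.foldl_append, heq, List.foldl_cons, List.foldl_nil]
    by_cases hr0 : r = 0
    · -- first iteration: empty deque, empty window
      subst hr0
      obtain ⟨hws0, hdq0, hhd0⟩ := h0 rfl
      subst hws0; subst hdq0; subst hhd0
      have hC0 : pvCState p b pm 0 = (0, 0) := rfl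
      rw [hC0]
      simp only [pvBStep, List.length_nil]
      have hpop0 : pvPopLoop b 0 0 0 [] = [] := rfl
      rw [hpop0]
      have hshr0 : pvShrinkLoop p b pm 0 ([] ++ [0]) (0 - 0) 0 0 (0 + p.getD 0 0)
          = (0, 0, 0 + p.getD 0 0) := rfl
      rw [hshr0]
      have hwm : pvWmax b 0 0 = b.getD 0 0 := by
        unfold pvWmax; rw [pvWin_self (by omega)]; rfl
      have hwsm : pvWsum p 0 0 = p.getD 0 0 := by
        unfold pvWsum; rw [pvWin_self hrp]; simp
      refine ⟨0 + p.getD 0 0, [0], 0, ?_, ?_, by omega⟩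
      · simp only [pvCState, pvCShrink]
        unfold pvCost
        rw [hwm, hwsm]
        norm_num [max_comm]
      · intro _
        refine ⟨?_, by simp, ?_⟩
        · simp only [pvCState, pvCShrink]
          show (0 : Int) + p.getD 0 0 = pvWsum p 0 0
          rw [hwsm]; omega
        · simp only [pvCState, pvCShrink]
          rw [List.drop_zero, ← pvCands_self (b := b) (r := 0)]
      -- end r = 0
    · have hr1' : 1 ≤ r := by omega
      obtain ⟨hws, hhd, hdq⟩ := h1 hr1'
      have hfle : (pvCState p b pm r).1 ≤ r - 1 := pvCState_front_le r hr1'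
      set front := (pvCState p b pm r).1 with hfront
      set a := (pvCState p b pm r).2 with ha
      simp only [pvBStep]
      -- running sum over the extended window
      have hA1 : front ≤ r - 1 := hfle
      have hA2 : front < p.length := lt_of_le_of_lt hA1 (by omega)
      have hA3 : (r - 1) + 1 < p.length := by omega
      have hws0 : ws + p.getD r 0 = pvWsum p front r := by
        conv_lhs => rw [hws]
        conv_rhs => rw [(Nat.sub_add_cancel hr1').symm]
        rw [pvWsum_snoc hA1 hA2 hA3, Nat.sub_add_cancel hr1']
      -- pop + append maintains the candidate list
      have hpw : (dq.drop head).Pairwise (fun i j => b.getD j 0 < b.getD i 0) := by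
        rw [hdq]; exact pvCands_pairwise
      have hpop := pvPop_spec (b := b) (r := r) (head := head) dq.length dq le_rfl hhd hpw
      have hlen_take : (dq.take head).length = head := by
        rw [List.length_take]; omega
      have hdropX : ∀ (X Y : List Nat), X.length = head → (X ++ Y).drop head = Y := by
        intro X Y hX
        rw [← hX, List.drop_left]
      have hdq' : (pvPopLoop b r head dq.length dq ++ [r]).drop head
          = pvCands b front r := by
        rw [hpop, List.append_assoc, hdropX _ _ hlen_take, hdq]
        conv_lhs => rw [(Nat.sub_add_cancel hr1').symm]
        conv_rhs => rw [(Nat.sub_add_cancel hr1').symm]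
        rw [pvCands_snoc hA1, Nat.add_sub_cancel]
      -- the shrink loop
      obtain ⟨h', hseq, hdrop'⟩ := pvShrink_spec (dq := pvPopLoop b r head dq.length dq ++ [r])
        hrp hrb (r - front) front head (ws + p.getD r 0) rfl (le_trans hA1 (Nat.sub_le r 1)) hdq' hws0
      rw [hseq]
      set F := pvCShrink p b pm r (r - front) front with hF
      have hFle : F ≤ r := pvCShrink_le (r - front) front (by omega)
      have hCnext : pvCState p b pm (r+1)
          = (F, if pvCost p b F r ≤ pm then max ((r : Int) - (F : Int) + 1) a else a) := by
        simp only [pvCState]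
        rfl
      have hget : b.getD ((pvPopLoop b r head dq.length dq ++ [r]).getD h' 0) 0
          = pvWmax b F r := by
        have hgetD : (pvPopLoop b r head dq.length dq ++ [r]).getD h' 0
            = ((pvPopLoop b r head dq.length dq ++ [r]).drop h').getD 0 0 := by
          rw [List.getD_eq_getElem?_getD, List.getD_eq_getElem?_getD, List.getElem?_drop,
            Nat.add_zero]
        have hhd2 : (pvCands b F r).getD 0 0 = (pvCands b F r).headD 0 := by
          rcases pvCands b F r with _ | ⟨x, t⟩ <;> rfl
        rw [hgetD, hdrop', hhd2, pvCands_head hFle hrb]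
      have hcost : b.getD ((pvPopLoop b r head dq.length dq ++ [r]).getD h' 0) 0
            + pvWsum p F r * ((r : Int) - (F : Int) + 1)
          = pvCost p b F r := by
        rw [hget]; rfl
      have hh'le : h' ≤ (pvPopLoop b r head dq.length dq ++ [r]).length := by
        by_contra hcon
        have : (pvPopLoop b r head dq.length dq ++ [r]).drop h' = [] :=
          List.drop_eq_nil_of_le (by omega)
        rw [hdrop'] at this
        exact pvCands_ne_nil hFle this
      refine ⟨pvWsum p F r, pvPopLoop b r head dq.length dq ++ [r], h', ?_, ?_, by omega⟩
      · rw [hCnext, hcost]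
        by_cases hok : pvCost p b F r ≤ pm
        · rw [if_pos hok, if_pos hok, max_comm]
        · rw [if_neg hok, if_neg hok]
      · intro _
        rw [hCnext]
        exact ⟨by simp, hh'le, by simpa using hdrop'⟩


-- ===== VERDICT (by name: the statement is the Claim_ definition above) =====
theorem findMaximumSustainableClusterSize_spec : Claim_equal_findMaximumSustainableClusterSize := by
  intro p b pm _ hPre
  obtain ⟨hne, hlen⟩ := hPre
  unfold Spec_findMaximumSustainableClusterSize
  have hn1 : 1 ≤ p.length := List.length_pos_iff.mpr hne
  show pvALoop p b pm p.length (2*p.length+1) 0 0 0 (b.getD 0 0) (p.getD 0 0)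
      = findMaximumSustainableClusterSize_alt p b pm
  have hwm0 : b.getD 0 0 = pvWmax b 0 0 := by
    unfold pvWmax; rw [pvWin_self (by omega)]; rfl
  have hws0 : p.getD 0 0 = pvWsum p 0 0 := by
    unfold pvWsum; rw [pvWin_self (by omega)]; simp
  rw [hwm0, hws0,
    pvALoop_eq_cRest rfl hlen (2*p.length+1) 0 0 0 (le_refl 0) (by omega) (by omega),
    Nat.sub_zero, pvCRest_eq_cState p.length 0 0 0 rfl, Nat.zero_add]
  obtain ⟨ws, dq, head, heq, -, -⟩ := pvBFold_eq_cState (pm := pm) hlen p.length le_rfl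
  show _ = ((List.range p.length).foldl (pvBStep p b pm) (0, 0, 0, ([] : List Nat), 0)).1
  rw [heq]
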